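-- pv_equiv track=rewrite | github.com/cortensor/community-projects | apps/cortensor-recaptgbot/src/bot.py | wrap_tables_with_pre
-- ===== SOURCE A (Python) =====
-- def wrap_tables_with_pre(text: str) -> str:
--     # Find blocks of lines with pipes and wrap them in <pre>...</pre>
--     lines = text.splitlines()
--     result = []
--     in_table = False
--     table_block = []
--     for line in lines:
--         if '|' in line:
--             table_block.append(line)
--             in_table = True
--         else:
--             if in_table and table_block:
--                 # End of table block
--                 result.append('<pre>' + '\n'.join(table_block) + '</pre>')
--                 table_block = []
--                 in_table = False
--             result.append(line)
--     if in_table and table_block: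
--         result.append('<pre>' + '\n'.join(table_block) + '</pre>')
--     return '\n'.join(result)
-- ===== SOURCE B (Python) =====
-- def wrap_tables_with_pre(text: str) -> str:
--     # Run-based scan: each maximal run of pipe lines becomes one <pre> block.
--     lines = text.splitlines()
--     out = []
--     i, n = 0, len(lines)
--     while i < n:
--         if '|' in lines[i]:
--             j = i + 1
--             while j < n and '|' in lines[j]:
--                 j += 1
--             out.append('<pre>' + '\n'.join(lines[i:j]) + '</pre>')
--             i = j
--         else:
--             out.append(lines[i])
--             i += 1
--     return '\n'.join(out)
-- ===== Notes on version B (the rewrite author's own statement) =====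
-- stated objective: alternative
-- what changed: Replaces A's flag/accumulator state machine with post-loop flush by a two-pointer run scan that consumes each maximal run of pipe lines at once and emits its <pre> block immediately, with no carried flag or pending-block state.
import Mathlib
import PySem

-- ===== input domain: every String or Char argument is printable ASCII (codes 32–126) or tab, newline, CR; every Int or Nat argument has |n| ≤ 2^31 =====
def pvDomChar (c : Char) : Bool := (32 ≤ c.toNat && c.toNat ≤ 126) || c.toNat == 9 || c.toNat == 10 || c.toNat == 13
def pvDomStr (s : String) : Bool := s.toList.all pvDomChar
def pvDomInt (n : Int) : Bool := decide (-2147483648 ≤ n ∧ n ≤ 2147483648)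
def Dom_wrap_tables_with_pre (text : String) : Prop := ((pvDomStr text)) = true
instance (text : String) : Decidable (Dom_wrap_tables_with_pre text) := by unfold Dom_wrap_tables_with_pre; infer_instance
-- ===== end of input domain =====

-- B replaces A's flag/accumulator state machine by a two-pointer run scan (objective: alternative).

-- ===== PORT A =====
-- state = (result, in_table, table_block)
def wtpStep (s : List String × Bool × List String) (line : String) :
    List String × Bool × List String :=
  let (result, in_table, table_block) := s
  if PySem.Str.isIn "|" line then
    (result, true, table_block ++ [line])
  else
    if in_table && !table_block.isEmpty then
      (result ++ ["<pre>" ++ PySem.Str.join "\n" table_block ++ "</pre>", line], false, [])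
    else
      (result ++ [line], in_table, table_block)

def wtpFinish (s : List String × Bool × List String) : List String :=
  let (result, in_table, table_block) := s
  if in_table && !table_block.isEmpty then
    result ++ ["<pre>" ++ PySem.Str.join "\n" table_block ++ "</pre>"]
  else result

def wrap_tables_with_pre (text : String) : String :=
  let lines := PySem.Str.splitlines text
  PySem.Str.join "\n" (wtpFinish (lines.foldl wtpStep ([], false, [])))

-- ===== PORT B =====
-- the inner 'while j < n and '|' in lines[j]' run is the takeWhile/dropWhile span
def wtpGo : List String → List String
  | [] => []
  | line :: rest =>
    if PySem.Str.isIn "|" line then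
      ("<pre>" ++
        PySem.Str.join "\n" (line :: rest.takeWhile (fun l => PySem.Str.isIn "|" l)) ++
        "</pre>") :: wtpGo (rest.dropWhile (fun l => PySem.Str.isIn "|" l))
    else
      line :: wtpGo rest
termination_by ls => ls.length
decreasing_by
  · exact Nat.lt_succ_of_le (List.length_dropWhile_le _ _)
  · simp

def wrap_tables_with_pre_alt (text : String) : String :=
  PySem.Str.join "\n" (wtpGo (PySem.Str.splitlines text))

-- ===== PRECONDITION & SPEC =====
def Spec_wrap_tables_with_pre (text : String) (out : String) : Prop := out = wrap_tables_with_pre_alt text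
instance (text : String) (out : String) : Decidable (Spec_wrap_tables_with_pre text out) := by unfold Spec_wrap_tables_with_pre; infer_instance

-- ===== CLAIM (what is proved, stated in full; the proofs are below) =====
def Claim_equal_wrap_tables_with_pre : Prop := ∀ (text : String), Dom_wrap_tables_with_pre text → Spec_wrap_tables_with_pre text (wrap_tables_with_pre text)

-- ===== LEMMAS AND PROOFS =====

-- Both parts of the fold↔run-scan correspondence, proved together by one induction on ls.
theorem wtp_fold_both (ls : List String) :
    (∀ res : List String,
        wtpFinish (ls.foldl wtpStep (res, false, [])) = res ++ wtpGo ls) ∧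
    (∀ (res b : List String), b ≠ [] →
        wtpFinish (ls.foldl wtpStep (res, true, b)) =
          res ++ ("<pre>" ++
              PySem.Str.join "\n" (b ++ ls.takeWhile (fun l => PySem.Str.isIn "|" l)) ++
              "</pre>") :: wtpGo (ls.dropWhile (fun l => PySem.Str.isIn "|" l))) := by
  induction ls with
  | nil =>
    constructor
    · intro res; simp [wtpFinish, wtpGo]
    · intro res b hb
      simp [wtpFinish, hb, wtpGo]
  | cons l t ih =>
    obtain ⟨ih1, ih2⟩ := ih
    constructor
    · intro res
      by_cases hp : PySem.Chars.isIn ['|'] l.toList = true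
      · rw [List.foldl_cons, show wtpStep (res, false, []) l = (res, true, [l]) by
          simp [wtpStep, hp]]
        rw [ih2 res [l] (by simp)]
        conv_rhs => rw [wtpGo.eq_def]
        simp [hp]
      · rw [List.foldl_cons, show wtpStep (res, false, []) l = (res ++ [l], false, []) by
          simp [wtpStep, hp]]
        rw [ih1 (res ++ [l])]
        conv_rhs => rw [wtpGo.eq_def]
        simp [hp]
    · intro res b hb
      by_cases hp : PySem.Chars.isIn ['|'] l.toList = true
      · rw [List.foldl_cons, show wtpStep (res, true, b) l = (res, true, b ++ [l]) by
          simp [wtpStep, hp]]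
        rw [ih2 res (b ++ [l]) (by simp)]
        simp [hp]
      · rw [List.foldl_cons, show wtpStep (res, true, b) l =
            (res ++ ["<pre>" ++ PySem.Str.join "\n" b ++ "</pre>", l], false, []) by
          simp [wtpStep, hp, hb]]
        rw [ih1 _]
        rw [List.takeWhile_cons, List.dropWhile_cons]
        conv_rhs => rw [wtpGo.eq_def]
        simp [hp]

-- ===== VERDICT (by name: the statement is the Claim_ definition above) =====
theorem wrap_tables_with_pre_spec : Claim_equal_wrap_tables_with_pre := by
  intro text _
  unfold Spec_wrap_tables_with_pre wrap_tables_with_pre wrap_tables_with_pre_alt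
  show PySem.Str.join "\n" (wtpFinish (List.foldl wtpStep ([], false, []) (PySem.Str.splitlines text))) = _
  rw [(wtp_fold_both (PySem.Str.splitlines text)).1 []]
  simp
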